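-- pv_equiv track=rewrite | github.com/Tbread/AlgorithmPrac | 프로그래머스/greedy_01.py | solution
-- ===== SOURCE A (Python) =====
-- def solution(n, lost, reserve):
--     lost.sort()
--     reserve.sort()
--     losts = []
--     for lo in lost:
--         losts.append(lo)
--     for borrow in lost:
--         if borrow - 1 in reserve:
--             idx = losts.index(borrow)
--             losts.pop(idx)
--             idx = reserve.index(borrow - 1)
--             reserve.pop(idx)
--             continue
--         if borrow in reserve:
--             idx = losts.index(borrow)
--             losts.pop(idx)
--             idx = reserve.index(borrow)
--             reserve.pop(idx)
--             continue
--         if borrow + 1 in reserve: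
--             idx = losts.index(borrow)
--             losts.pop(idx)
--             idx = reserve.index(borrow + 1)
--             reserve.pop(idx)
--     return n - len(losts)
-- ===== SOURCE B (Python) =====
-- def solution(n, lost, reserve):
--     # Two-pointer merge over the two sorted lists: advance past reserve sizes
--     # that are too small, skip lost sizes that are too large for the current
--     # reserve, match otherwise.  (Does not mutate its list arguments, unlike
--     # A, which sorts them in place and pops from reserve.)
--     ls = sorted(lost)
--     rs = sorted(reserve)
--     matched = i = j = 0
--     while i < len(ls) and j < len(rs):
--         if rs[j] < ls[i] - 1:
--             j += 1
--         elif rs[j] > ls[i] + 1: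
--             i += 1
--         else:
--             matched += 1
--             i += 1
--             j += 1
--     return n - len(ls) + matched
-- ===== Notes on version B (the rewrite author's own statement) =====
-- stated objective: faster
-- what changed: Replaces A's per-student membership tests, list.index and list.pop scans over mutated lists with a two-pointer merge over the two sorted lists, one O(1) comparison step per pointer advance.
import Mathlib
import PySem

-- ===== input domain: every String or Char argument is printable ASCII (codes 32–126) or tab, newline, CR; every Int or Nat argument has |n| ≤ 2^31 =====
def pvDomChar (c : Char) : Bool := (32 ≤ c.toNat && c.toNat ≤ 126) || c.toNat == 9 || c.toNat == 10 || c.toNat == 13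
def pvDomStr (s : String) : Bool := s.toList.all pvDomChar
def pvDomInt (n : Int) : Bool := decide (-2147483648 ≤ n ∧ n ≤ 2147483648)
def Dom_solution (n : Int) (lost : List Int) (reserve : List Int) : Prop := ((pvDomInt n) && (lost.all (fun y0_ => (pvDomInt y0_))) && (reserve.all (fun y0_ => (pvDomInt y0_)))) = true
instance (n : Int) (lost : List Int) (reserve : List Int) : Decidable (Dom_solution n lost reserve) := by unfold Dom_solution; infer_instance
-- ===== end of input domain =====

-- B replaces A's per-student membership/index/pop scans with a two-pointer merge over the
-- two sorted lists. A sorts `lost` and `reserve` in place and pops from `reserve`; B does not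
-- mutate its arguments: the equivalence proved is about the RETURN value only.

-- ===== PORT A =====
-- `idx = xs.index(v); xs.pop(idx)`: A only runs this after checking membership, so the
-- `none` branches (where Python would raise ValueError/IndexError) are unreachable.
def popFirst (xs : List Int) (v : Int) : List Int :=
  match PySem.List.index? xs v with
  | some idx =>
      match PySem.List.pop? xs (idx : Int) with
      | some (_, rest) => rest
      | none => xs
  | none => xs

def stepA (st : List Int × List Int) (borrow : Int) : List Int × List Int :=
  if borrow - 1 ∈ st.2 then
    (popFirst st.1 borrow, popFirst st.2 (borrow - 1))
  else if borrow ∈ st.2 then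
    (popFirst st.1 borrow, popFirst st.2 borrow)
  else if borrow + 1 ∈ st.2 then
    (popFirst st.1 borrow, popFirst st.2 (borrow + 1))
  else st

def solution (n : Int) (lost : List Int) (reserve : List Int) : Int :=
  let lostS := PySem.List.sorted lost (fun x => x) false
  let reserveS := PySem.List.sorted reserve (fun x => x) false
  let losts := lostS.foldl (fun acc lo => acc ++ [lo]) ([] : List Int)
  let final := lostS.foldl stepA (losts, reserveS)
  n - final.1.length

-- ===== PORT B =====
-- the `while i < len(ls) and j < len(rs)` loop: the index pair (i, j) becomes the pair of
-- remaining suffixes of the two sorted lists; `matched` is the value returned.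
def twoPtrB (ls rs : List Int) : Int :=
  match ls, rs with
  | l :: ls', r :: rs' =>
      if r < l - 1 then twoPtrB (l :: ls') rs'
      else if r > l + 1 then twoPtrB ls' (r :: rs')
      else 1 + twoPtrB ls' rs'
  | _, _ => 0
termination_by ls.length + rs.length
decreasing_by all_goals (simp [List.length_cons]; try omega)

def solution_alt (n : Int) (lost : List Int) (reserve : List Int) : Int :=
  let ls := PySem.List.sorted lost (fun x => x) false
  let rs := PySem.List.sorted reserve (fun x => x) false
  n - ls.length + twoPtrB ls rs

-- ===== PRECONDITION & SPEC =====
def Spec_solution (n : Int) (lost : List Int) (reserve : List Int) (out : Int) : Prop := out = solution_alt n lost reserve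
instance (n : Int) (lost : List Int) (reserve : List Int) (out : Int) : Decidable (Spec_solution n lost reserve out) := by unfold Spec_solution; infer_instance

-- ===== CLAIM (what is proved, stated in full; the proofs are below) =====
def Claim_equal_solution : Prop := ∀ (n : Int) (lost : List Int) (reserve : List Int), Dom_solution n lost reserve → Spec_solution n lost reserve (solution n lost reserve)

-- ===== LEMMAS AND PROOFS =====

-- A's `xs.index(v)` + `xs.pop(idx)` removes the first occurrence of v.
theorem popFirst_eq_erase (xs : List Int) (v : Int) (h : v ∈ xs) :
    popFirst xs v = xs.erase v := by
  induction xs with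
  | nil => cases h
  | cons x xs ih =>
    by_cases hx : x = v
    · subst hx
      have h0 : (0 : Nat) < (x :: xs).length := by simp
      rw [popFirst, PySem.List.index?_cons_self x xs]
      dsimp only
      rw [PySem.List.pop?_natCast _ 0 h0]
      simp
    · have hv : v ∈ xs := by cases h with
        | head => exact absurd rfl hx
        | tail _ h' => exact h'
      have hs : (PySem.List.index? xs v).isSome = true := by
        rw [PySem.List.index?_isSome_iff]; exact hv
      rcases Option.isSome_iff_exists.mp hs with ⟨i, hi⟩
      have hlt : i < xs.length := by
        rcases PySem.List.getElem_of_index?_eq_some hi with ⟨hk, _⟩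
        exact hk
      have hlt' : i + 1 < (x :: xs).length := by simp; omega
      rw [popFirst, PySem.List.index?_cons_of_ne xs hx, hi]
      dsimp only [Option.map_some]
      rw [PySem.List.pop?_natCast _ (i + 1) hlt']
      have hih : popFirst xs v = xs.erase v := ih hv
      rw [popFirst, hi] at hih
      dsimp only at hih
      rw [PySem.List.pop?_natCast _ i hlt] at hih
      dsimp only at hih
      dsimp only
      rw [List.eraseIdx_cons_succ, hih, List.erase_cons_tail (by simp [hx])]

-- greedyA counts, abstractly, how many lost sizes A's loop matches.
def greedyA : List Int → List Int → Nat
  | [], _ => 0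
  | b :: bs, rsv =>
    if b - 1 ∈ rsv then 1 + greedyA bs (rsv.erase (b - 1))
    else if b ∈ rsv then 1 + greedyA bs (rsv.erase b)
    else if b + 1 ∈ rsv then 1 + greedyA bs (rsv.erase (b + 1))
    else greedyA bs rsv

-- A's fold over stepA removes exactly (greedyA bs rsv) elements from losts.
theorem loop_inv (bs : List Int) :
    ∀ (losts rsv : List Int),
    (∀ c, bs.count c ≤ losts.count c) →
    (bs.foldl stepA (losts, rsv)).1.length + greedyA bs rsv = losts.length := by
  induction bs with
  | nil => intro losts rsv _; simp [greedyA]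
  | cons b bs ih =>
    intro losts rsv Hsub
    have hbl : b ∈ losts := by
      have := Hsub b
      simp at this
      exact List.count_pos_iff.mp (by omega)
    have hlostlen : (losts.erase b).length = losts.length - 1 :=
      List.length_erase_of_mem hbl
    have hlpos : 0 < losts.length := List.length_pos_of_mem hbl
    have hsub' : ∀ c', bs.count c' ≤ (losts.erase b).count c' := by
      intro c'
      have := Hsub c'
      by_cases hcb : c' = b
      · subst hcb
        simp at this
        rw [List.count_erase_self]
        omega
      · have hbc : ¬ b = c' := fun h => hcb h.symm
        simp only [List.count_cons, hbc, if_false, beq_iff_eq, Nat.add_zero] at this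
        rw [List.count_erase_of_ne hcb]
        omega
    have hsub'' : ∀ c', bs.count c' ≤ losts.count c' := by
      intro c'
      have := Hsub c'
      simp only [List.count_cons] at this
      split_ifs at this <;> omega
    simp only [List.foldl_cons]
    by_cases h1 : b - 1 ∈ rsv
    · rw [show stepA (losts, rsv) b = (popFirst losts b, popFirst rsv (b - 1)) by
          simp [stepA, h1]]
      rw [popFirst_eq_erase losts b hbl, popFirst_eq_erase rsv (b - 1) h1]
      rw [show greedyA (b :: bs) rsv = 1 + greedyA bs (rsv.erase (b - 1)) by
          simp [greedyA, h1]]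
      have := ih (losts.erase b) (rsv.erase (b - 1)) hsub'
      omega
    · by_cases h2 : b ∈ rsv
      · rw [show stepA (losts, rsv) b = (popFirst losts b, popFirst rsv b) by
            simp [stepA, h1, h2]]
        rw [popFirst_eq_erase losts b hbl, popFirst_eq_erase rsv b h2]
        rw [show greedyA (b :: bs) rsv = 1 + greedyA bs (rsv.erase b) by
            simp [greedyA, h1, h2]]
        have := ih (losts.erase b) (rsv.erase b) hsub'
        omega
      · by_cases h3 : b + 1 ∈ rsv
        · rw [show stepA (losts, rsv) b = (popFirst losts b, popFirst rsv (b + 1)) by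
              simp [stepA, h1, h2, h3]]
          rw [popFirst_eq_erase losts b hbl, popFirst_eq_erase rsv (b + 1) h3]
          rw [show greedyA (b :: bs) rsv = 1 + greedyA bs (rsv.erase (b + 1)) by
              simp [greedyA, h1, h2, h3]]
          have := ih (losts.erase b) (rsv.erase (b + 1)) hsub'
          omega
        · rw [show stepA (losts, rsv) b = (losts, rsv) by simp [stepA, h1, h2, h3]]
          rw [show greedyA (b :: bs) rsv = greedyA bs rsv by simp [greedyA, h1, h2, h3]]
          exact ih losts rsv hsub''

theorem greedyA_nil (ls : List Int) : greedyA ls [] = 0 := by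
  induction ls with
  | nil => simp [greedyA]
  | cons b bs ih => simp [greedyA, ih]

-- a reserve size strictly below every remaining lost size minus one is dead: it is never
-- consulted nor removed by greedyA.
theorem greedyA_dead_head (ls : List Int) :
    ∀ (r : Int) (rs : List Int), (∀ b ∈ ls, r < b - 1) →
    greedyA ls (r :: rs) = greedyA ls rs := by
  induction ls with
  | nil => intro r rs _; simp [greedyA]
  | cons b bs ih =>
    intro r rs H
    have hb : r < b - 1 := H b (by simp)
    have hbs : ∀ b' ∈ bs, r < b' - 1 := fun b' h => H b' (by simp [h])
    have e1 : r ≠ b - 1 := by omega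
    have e2 : r ≠ b := by omega
    have e3 : r ≠ b + 1 := by omega
    have m1 : (b - 1 ∈ r :: rs) ↔ (b - 1 ∈ rs) := by simp [Ne.symm e1]
    have m2 : (b ∈ r :: rs) ↔ (b ∈ rs) := by simp [Ne.symm e2]
    have m3 : (b + 1 ∈ r :: rs) ↔ (b + 1 ∈ rs) := by simp [Ne.symm e3]
    by_cases h1 : b - 1 ∈ rs
    · simp only [greedyA, m1, h1, if_true]
      rw [List.erase_cons_tail (by simp [e1])]
      rw [ih r (rs.erase (b - 1)) hbs]
    · by_cases h2 : b ∈ rs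
      · simp only [greedyA, m1, m2, h1, h2, if_true, if_false]
        rw [List.erase_cons_tail (by simp [e2])]
        rw [ih r (rs.erase b) hbs]
      · by_cases h3 : b + 1 ∈ rs
        · simp only [greedyA, m1, m2, m3, h1, h2, h3, if_true, if_false]
          rw [List.erase_cons_tail (by simp [e3])]
          rw [ih r (rs.erase (b + 1)) hbs]
        · simp only [greedyA, m1, m2, m3, h1, h2, h3, if_false]
          exact ih r rs hbs

-- on sorted inputs, the abstract greedy count IS the two-pointer count.
theorem greedyA_eq_twoPtrB (k : Nat) :
    ∀ (ls rs : List Int), ls.length + rs.length ≤ k →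
    ls.Pairwise (· ≤ ·) → rs.Pairwise (· ≤ ·) →
    (greedyA ls rs : Int) = twoPtrB ls rs := by
  induction k with
  | zero =>
    intro ls rs hk _ _
    have : ls = [] := by cases ls <;> simp_all
    subst this
    simp [greedyA, twoPtrB]
  | succ k ih =>
    intro ls rs hk hls hrs
    match ls, rs with
    | [], rs => simp [greedyA, twoPtrB]
    | l :: ls', [] => simp [greedyA_nil, twoPtrB]
    | l :: ls', r :: rs' =>
      have hl' : ∀ x ∈ ls', l ≤ x := (List.pairwise_cons.mp hls).1
      have hr' : ∀ x ∈ rs', r ≤ x := (List.pairwise_cons.mp hrs).1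
      have hls' : ls'.Pairwise (· ≤ ·) := (List.pairwise_cons.mp hls).2
      have hrs' : rs'.Pairwise (· ≤ ·) := (List.pairwise_cons.mp hrs).2
      simp only [List.length_cons] at hk
      by_cases c1 : r < l - 1
      · rw [show twoPtrB (l :: ls') (r :: rs') = twoPtrB (l :: ls') rs' by
            rw [twoPtrB]; simp [c1]]
        rw [greedyA_dead_head (l :: ls') r rs' (by
          intro b hb
          cases hb with
          | head => omega
          | tail _ h => have := hl' b h; omega)]
        exact ih (l :: ls') rs' (by simp; omega) hls hrs'
      · by_cases c2 : r > l + 1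
        · have hgt : ∀ x ∈ r :: rs', l + 1 < x := by
            intro x hx
            cases hx with
            | head => omega
            | tail _ h => have := hr' x h; omega
          have n1 : l - 1 ∉ r :: rs' := fun h => by have := hgt _ h; omega
          have n2 : l ∉ r :: rs' := fun h => by have := hgt _ h; omega
          have n3 : l + 1 ∉ r :: rs' := fun h => by have := hgt _ h; omega
          rw [show twoPtrB (l :: ls') (r :: rs') = twoPtrB ls' (r :: rs') by
              rw [twoPtrB]; simp [c1, c2]]
          rw [show greedyA (l :: ls') (r :: rs') = greedyA ls' (r :: rs') by
              simp [greedyA, n1, n2, n3]]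
          exact ih ls' (r :: rs') (by simp; omega) hls' hrs
        · -- l - 1 ≤ r ≤ l + 1: the heads match in both programs.
          have hmatch : greedyA (l :: ls') (r :: rs') = 1 + greedyA ls' rs' := by
            by_cases e1 : r = l - 1
            · subst e1
              simp [greedyA, List.erase_cons_head]
            · by_cases e2 : r = l
              · subst e2
                have n1 : r - 1 ∉ r :: rs' := by
                  intro h
                  rcases List.mem_cons.mp h with h | h
                  · omega
                  · have := hr' _ h; omega
                simp [greedyA, n1, List.erase_cons_head]
              · have e3 : r = l + 1 := by omega
                subst e3
                have n1 : l - 1 ∉ (l + 1) :: rs' := by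
                  intro h
                  rcases List.mem_cons.mp h with h | h
                  · omega
                  · have := hr' _ h; omega
                have n2 : l ∉ (l + 1) :: rs' := by
                  intro h
                  rcases List.mem_cons.mp h with h | h
                  · omega
                  · have := hr' _ h; omega
                simp [greedyA, n1, n2, List.erase_cons_head]
          rw [hmatch,
            show twoPtrB (l :: ls') (r :: rs') = 1 + twoPtrB ls' rs' by
              rw [twoPtrB]; simp [c1, c2]]
          rw [← ih ls' rs' (by omega) hls' hrs']
          push_cast
          ring

-- ===== VERDICT (by name: the statement is the Claim_ definition above) =====
theorem solution_spec : Claim_equal_solution := by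
  intro n lost reserve _
  unfold Spec_solution solution solution_alt
  dsimp only
  rw [PySem.List.foldl_append_singleton, List.nil_append]
  have h := loop_inv (PySem.List.sorted lost (fun x => x) false)
    (PySem.List.sorted lost (fun x => x) false)
    (PySem.List.sorted reserve (fun x => x) false)
    (fun _ => le_refl _)
  have hg := greedyA_eq_twoPtrB
    ((PySem.List.sorted lost (fun x => x) false).length
      + (PySem.List.sorted reserve (fun x => x) false).length)
    (PySem.List.sorted lost (fun x => x) false)
    (PySem.List.sorted reserve (fun x => x) false)
    (le_refl _)
    (PySem.List.sorted_pairwise lost (fun x => x))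
    (PySem.List.sorted_pairwise reserve (fun x => x))
  have hlen : (PySem.List.sorted lost (fun x => x) false).length = lost.length :=
    PySem.List.length_sorted lost (fun x => x) false
  rw [hlen] at h
  omega
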